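-- pv_equiv track=rewrite | github.com/centre-for-humanities-computing/text_to_x | text_to_x/vaderSentiment/vaderSentiment_se.py | allcap_differential
-- ===== SOURCE A (Python) =====
-- def allcap_differential(words):
--     """
--     Check whether just some words in the input are ALL CAPS
--     :param list words: The words to inspect
--     :returns: `True` if some but not all items in `words` are ALL CAPS
--     """
--     is_different = False
--     allcap_words = 0
--     for word in words:
--         if word.isupper():
--             allcap_words += 1
--     cap_differential = len(words) - allcap_words
--     if 0 < cap_differential < len(words):
--         is_different = True
--     return is_different
-- ===== SOURCE B (Python) =====
-- def allcap_differential(words):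
--     """
--     Check whether just some words in the input are ALL CAPS
--     :param list words: The words to inspect
--     :returns: `True` if some but not all items in `words` are ALL CAPS
--     """
--     return any(w.isupper() for w in words) and not all(w.isupper() for w in words)
-- ===== Notes on version B (the rewrite author's own statement) =====
-- stated objective: idiomatic
-- what changed: Replaces the integer tally compared against len(words) with two short-circuiting quantifier passes: any(w.isupper()) and not all(w.isupper()).
import Mathlib
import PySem

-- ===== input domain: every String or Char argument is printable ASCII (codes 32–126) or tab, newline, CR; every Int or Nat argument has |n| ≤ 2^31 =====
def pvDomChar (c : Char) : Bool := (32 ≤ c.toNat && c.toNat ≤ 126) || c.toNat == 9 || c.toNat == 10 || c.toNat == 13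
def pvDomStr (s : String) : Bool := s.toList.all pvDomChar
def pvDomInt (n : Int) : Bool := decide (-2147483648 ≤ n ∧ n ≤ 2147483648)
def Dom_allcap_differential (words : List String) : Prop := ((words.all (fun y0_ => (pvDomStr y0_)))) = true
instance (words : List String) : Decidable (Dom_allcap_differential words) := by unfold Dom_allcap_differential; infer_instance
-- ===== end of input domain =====

-- B's quantifier decomposition replaces A's counter compared to len(words); same behaviour, more idiomatic.

-- str.isupper() ported by hand (PySem has only the Char-level predicates): true iff the
-- string has at least one cased character and no lowercase character — exact on ASCII.
def pyStrIsupper (s : String) : Bool :=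
  s.toList.any (fun c => PySem.Chars.isupper c || PySem.Chars.islower c) &&
  s.toList.all (fun c => ! PySem.Chars.islower c)

-- ===== PORT A =====
def allcap_differential (words : List String) : Bool :=
  let allcap_words : Int :=
    words.foldl (fun acc word => if pyStrIsupper word then acc + 1 else acc) 0
  let cap_differential : Int := (words.length : Int) - allcap_words
  if 0 < cap_differential ∧ cap_differential < (words.length : Int) then true else false

-- ===== PORT B =====
def allcap_differential_alt (words : List String) : Bool :=
  (words.any (fun w => pyStrIsupper w)) && !(words.all (fun w => pyStrIsupper w))

-- ===== PRECONDITION & SPEC =====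
def Spec_allcap_differential (words : List String) (out : Bool) : Prop := out = allcap_differential_alt words
instance (words : List String) (out : Bool) : Decidable (Spec_allcap_differential words out) := by unfold Spec_allcap_differential; infer_instance

-- ===== CLAIM (what is proved, stated in full; the proofs are below) =====
def Claim_equal_allcap_differential : Prop := ∀ (words : List String), Dom_allcap_differential words → Spec_allcap_differential words (allcap_differential words)

-- ===== LEMMAS AND PROOFS =====

-- A's counting loop is countP, cast to Int.
theorem foldl_count_eq (words : List String) (n : Int) :
    words.foldl (fun acc word => if pyStrIsupper word then acc + 1 else acc) n
      = n + (words.countP (fun w => pyStrIsupper w) : Int) := by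
  induction words generalizing n with
  | nil => simp
  | cons w ws ih =>
    simp only [List.foldl_cons, List.countP_cons, ih]
    split_ifs with h <;> simp <;> ring

-- ===== VERDICT (by name: the statement is the Claim_ definition above) =====
theorem allcap_differential_spec : Claim_equal_allcap_differential := by
  intro words _
  unfold Spec_allcap_differential allcap_differential allcap_differential_alt
  simp only [foldl_count_eq, Int.zero_add]
  have hcle : words.countP (fun w => pyStrIsupper w) ≤ words.length := List.countP_le_length
  have hany : (words.any (fun w => pyStrIsupper w)) = true ↔
      0 < words.countP (fun w => pyStrIsupper w) := by
    rw [List.countP_pos_iff]; simp [List.any_eq_true]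
  have hall : (words.all (fun w => pyStrIsupper w)) = true ↔
      words.countP (fun w => pyStrIsupper w) = words.length := by
    rw [List.countP_eq_length]; simp [List.all_eq_true]
  by_cases ha : (words.any (fun w => pyStrIsupper w)) = true <;>
    by_cases hb : (words.all (fun w => pyStrIsupper w)) = true <;>
      rw [hany] at ha <;> rw [hall] at hb <;>
        simp only [ha, hb] at * <;> split_ifs with hc <;>
          simp_all
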